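-- pv_equiv track=rewrite | github.com/Arijitttt/competitive-programming | PYTHON/450qs set/array section/factorial_practice.py | factorial_practice
-- ===== SOURCE A (Python) =====
-- def factorial_practice(n):
--     resultt = []
--     fact = 1
--     for i in range(1,n+1):
--         fact *= i
--         #resultt.insert(0,fact)
--     while fact>0:
--         a = fact%10
--         resultt.insert(0,a)
--         fact //= 10
--     return resultt
--
-- n=6
-- ===== SOURCE B (Python) =====
-- def factorial_practice(n):
--     fact = 1
--     for i in range(1, n + 1):
--         fact *= i
--     return [int(c) for c in str(fact)]
-- ===== Notes on version B (the rewrite author's own statement) =====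
-- stated objective: idiomatic
-- what changed: The digit extraction is changed from a while loop of repeated modulo/floor-division steps with O(d) front-insertions into the result list to reading the digits off the decimal string representation str(fact); the factorial multiply loop itself is kept unchanged.
import Mathlib
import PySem

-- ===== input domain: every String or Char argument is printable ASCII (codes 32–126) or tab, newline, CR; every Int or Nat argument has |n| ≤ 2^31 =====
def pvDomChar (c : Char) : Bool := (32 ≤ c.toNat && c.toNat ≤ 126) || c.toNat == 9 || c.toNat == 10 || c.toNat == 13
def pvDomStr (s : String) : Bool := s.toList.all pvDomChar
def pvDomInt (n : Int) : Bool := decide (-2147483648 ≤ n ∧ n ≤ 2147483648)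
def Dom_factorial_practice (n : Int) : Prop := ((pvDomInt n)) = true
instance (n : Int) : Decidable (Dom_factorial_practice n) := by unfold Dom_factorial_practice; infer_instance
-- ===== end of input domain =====

-- B replaces A's while-loop digit extraction (repeated modulo/floor-division with front-insertions) by reading the digits
-- off the decimal string str(fact); the factorial multiply loop itself is kept unchanged.

-- ===== PORT A =====
-- the 'while fact > 0' loop: a = fact % 10; resultt.insert(0, a); fact //= 10
def fpDigLoop (fact : Int) (resultt : List Int) : List Int :=
  if _h : fact > 0 then
    fpDigLoop (PySem.Int.floordiv fact 10) (PySem.Int.mod fact 10 :: resultt)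
  else resultt
termination_by fact.toNat
decreasing_by
  rw [PySem.Int.floordiv_eq_ediv_of_pos (by omega : (0:Int) < 10)]
  have := Int.mul_ediv_add_emod fact 10
  have := Int.emod_nonneg fact (by omega : (10:Int) ≠ 0)
  have := Int.emod_lt_of_pos fact (by omega : (0:Int) < 10)
  omega

def factorial_practice (n : Int) : List Int :=
  let fact := (PySem.List.pyRange 1 (n + 1) 1).foldl (fun f i => f * i) 1
  fpDigLoop fact []

-- ===== PORT B =====
-- int(c): exact here because every character of str(fact) is a decimal digit (fact ≥ 1 always),
-- so Python's int(c) never raises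
def factorial_practice_alt (n : Int) : List Int :=
  let fact := (PySem.List.pyRange 1 (n + 1) 1).foldl (fun f i => f * i) 1
  (PySem.Int.toStr fact).toList.map (fun c => (PySem.Int.ofStr? (String.mk [c])).getD 0)

-- ===== PRECONDITION & SPEC =====
def Spec_factorial_practice (n : Int) (out : List Int) : Prop := out = factorial_practice_alt n
instance (n : Int) (out : List Int) : Decidable (Spec_factorial_practice n out) := by unfold Spec_factorial_practice; infer_instance

-- ===== CLAIM (what is proved, stated in full; the proofs are below) =====
def Claim_equal_factorial_practice : Prop := ∀ (n : Int), Dom_factorial_practice n → Spec_factorial_practice n (factorial_practice n)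

-- ===== LEMMAS AND PROOFS =====

-- the value B's comprehension computes for one character
def fpVal (c : Char) : Int := (PySem.Int.ofStr? (String.mk [c])).getD 0

lemma fpVal_digitChar {d : Nat} (hd : d < 10) : fpVal (Nat.digitChar d) = (d : Int) := by
  interval_cases d <;> decide

-- the factorial accumulator stays ≥ 1
lemma fp_foldl_pos (l : List Int) (hl : ∀ x ∈ l, 1 ≤ x) :
    ∀ acc : Int, 1 ≤ acc → 1 ≤ l.foldl (fun f i => f * i) acc := by
  induction l with
  | nil => intro acc h; simpa using h
  | cons x xs ih =>
    intro acc h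
    simp only [List.foldl_cons]
    exact ih (fun y hy => hl y (List.mem_cons_of_mem _ hy)) _
      (one_le_mul_of_one_le_of_one_le h (hl x (List.mem_cons_self)))

lemma fp_fact_pos (n : Int) :
    1 ≤ (PySem.List.pyRange 1 (n + 1) 1).foldl (fun f i => f * i) 1 := by
  refine fp_foldl_pos _ (fun x hx => ?_) 1 le_rfl
  have := (PySem.List.mem_pyRange_one (a := 1) (b := n + 1) (x := x)).1 hx
  omega

-- toDigitsCore prepends to its accumulator
lemma fp_tdc_append (f : Nat) : ∀ (n : Nat) (cs : List Char),
    Nat.toDigitsCore 10 f n cs = Nat.toDigitsCore 10 f n [] ++ cs := by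
  induction f with
  | zero => intro n cs; simp [Nat.toDigitsCore]
  | succ f ih =>
    intro n cs
    simp only [Nat.toDigitsCore]
    by_cases h : n / 10 = 0
    · simp [h]
    · simp only [h, if_false]
      rw [ih (n / 10) (Nat.digitChar (n % 10) :: cs), ih (n / 10) [Nat.digitChar (n % 10)],
        List.append_assoc]
      rfl

-- the key invariant: A's while loop computes B's mapped digit string
lemma fp_loop_eq_core (f : Nat) : ∀ (k : Nat), 0 < k → k < f → ∀ acc : List Int,
    fpDigLoop (k : Int) acc = (Nat.toDigitsCore 10 f k []).map fpVal ++ acc := by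
  induction f with
  | zero => intro k hk hf; omega
  | succ f ih =>
    intro k hk hf acc
    rw [fpDigLoop]
    have h10 : (0:Int) < 10 := by omega
    have hpos : ((k : Int) > 0) := by exact_mod_cast hk
    rw [dif_pos hpos]
    have hdiv : PySem.Int.floordiv (k : Int) 10 = ((k / 10 : Nat) : Int) := by
      rw [PySem.Int.floordiv_eq_ediv_of_pos h10]
      push_cast [Int.natCast_div]; rfl
    have hmod : PySem.Int.mod (k : Int) 10 = ((k % 10 : Nat) : Int) := by
      rw [PySem.Int.mod_eq_emod_of_pos h10]
      push_cast [Int.natCast_mod]; rfl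
    rw [hdiv, hmod]
    simp only [Nat.toDigitsCore]
    by_cases h : k / 10 = 0
    · have hk10 : k < 10 := by omega
      have hkm : k % 10 = k := Nat.mod_eq_of_lt hk10
      rw [h, hkm]
      norm_num
      rw [fpDigLoop, dif_neg (by omega)]
      simp [fpVal_digitChar hk10]
    · simp only [h, if_false]
      have hq : 0 < k / 10 := Nat.pos_of_ne_zero h
      have hqk : k / 10 < k := Nat.div_lt_self hk (by omega)
      rw [ih (k / 10) hq (by omega) ((k % 10 : Nat) :: acc),
        fp_tdc_append f (k / 10) [Nat.digitChar (k % 10)]]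
      rw [List.map_append, List.append_assoc]
      simp [fpVal_digitChar (Nat.mod_lt k (by omega))]

lemma fp_loop_eq_toChars (m : Int) (hm : 1 ≤ m) :
    fpDigLoop m [] = (PySem.Int.toChars m).map fpVal := by
  have hm0 : ¬ m < 0 := by omega
  have hcast : m = ((m.toNat : Nat) : Int) := by omega
  have hpos : 0 < m.toNat := by omega
  rw [PySem.Int.toChars, if_neg hm0, Nat.toDigits]
  rw [hcast, fp_loop_eq_core (m.toNat + 1) m.toNat hpos (by omega) []]
  rw [List.append_nil]
  congr 1

-- ===== VERDICT (by name: the statement is the Claim_ definition above) =====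
theorem factorial_practice_spec : Claim_equal_factorial_practice := by
  intro n _
  unfold Spec_factorial_practice factorial_practice factorial_practice_alt
  simp only []
  rw [PySem.Int.toList_toStr]
  exact fp_loop_eq_toChars _ (fp_fact_pos n)
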